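-- pv_equiv track=rewrite | github.com/ReactionMechanismGenerator/ARC | arc/species/zmat.py | order_fragments_by_constraints
-- ===== SOURCE A (Python) =====
-- import operator
-- from typing import TYPE_CHECKING, Dict, List, Optional, Tuple, Union
--
-- def order_fragments_by_constraints(fragments: List[List[int]],
--                                    constraints_dict: Optional[Dict[str, List[tuple]]] = None,
--                                    ) -> List[List[int]]:
--     """
--     Get the order in which atoms should be added to the zmat from a 2D or a 3D representation.
--
--     Args:
--         fragments (List[List[int]]):
--             Fragments represented by the species, i.e., as in a VdW well or a TS.
--             Entries are atom index lists of all atoms in a fragment, each list represents a different fragment.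
--         constraints_dict (dict, optional):
--             A dictionary of atom constraints. The function will try to find an atom order in which all constrained atoms
--             are after the atoms they are constraint to.
--
--     Returns:
--         List[List[int]]: The ordered fragments list.
--     """
--     if constraints_dict is None or not len(fragments):
--         return fragments
--     constraints_in_fragments = list()
--     for i in range(len(fragments)):
--         # Initialize with general constraint types and the original index.
--         constraints_in_fragments.append({'R': 0, 'A': 0, 'D': 0, 'i': i})
--     for constraint_type, constraint_list in constraints_dict.items():
--         for constraint in constraint_list:
--             for i, fragment in enumerate(fragments):
--                 if all([c in fragment for c in constraint]):
--                     constraints_in_fragments[i][constraint_type[0]] += 1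
--     constraints_in_fragments.sort(key=operator.itemgetter('R', 'A', 'D'), reverse=False)
--     new_order = [constraint['i'] for constraint in constraints_in_fragments]
--     new_fragments = [[]] * len(fragments)
--     for fragment, i in zip(fragments, new_order):
--         new_fragments[i] = fragment
--     return new_fragments
-- ===== SOURCE B (Python) =====
-- def order_fragments_by_constraints(fragments, constraints_dict=None):
--     if constraints_dict is None or not fragments:
--         return fragments
--     n = len(fragments)
--     atom_to_frags = {}
--     for idx, fragment in enumerate(fragments):
--         for atom in fragment:
--             atom_to_frags.setdefault(atom, set()).add(idx)
--     universe = set(range(n))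
--     cols = {'R': 0, 'A': 1, 'D': 2}
--     counts = [[0, 0, 0] for _ in range(n)]
--     for constraint_type, constraint_list in constraints_dict.items():
--         col = cols.get(constraint_type[:1])
--         if col is None:
--             continue
--         for constraint in constraint_list:
--             holders = universe
--             for atom in constraint:
--                 holders = holders & atom_to_frags.get(atom, set())
--             for idx in holders:
--                 counts[idx][col] += 1
--     order = sorted(range(n), key=lambda i: counts[i])
--     result = [[] for _ in range(n)]
--     for i, fragment in zip(order, fragments):
--         result[i] = fragment
--     return result
-- ===== Notes on version B (the rewrite author's own statement) =====
-- stated objective: alternative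
-- what changed: B builds an inverted atom-to-fragment-index dict once and finds each constraint's holder fragments by intersecting the index sets of its atoms, updating a counts table in place, instead of A's scan of every fragment with per-atom membership tests for every constraint (asymptotically fewer operations, though not measurably faster at the tested sizes).
-- outside the precondition, e.g. on order_fragments_by_constraints([[0], [1]], {'i': [[0]]}): A returns [[], [1]], B returns [[0], [1]]
import Mathlib
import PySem

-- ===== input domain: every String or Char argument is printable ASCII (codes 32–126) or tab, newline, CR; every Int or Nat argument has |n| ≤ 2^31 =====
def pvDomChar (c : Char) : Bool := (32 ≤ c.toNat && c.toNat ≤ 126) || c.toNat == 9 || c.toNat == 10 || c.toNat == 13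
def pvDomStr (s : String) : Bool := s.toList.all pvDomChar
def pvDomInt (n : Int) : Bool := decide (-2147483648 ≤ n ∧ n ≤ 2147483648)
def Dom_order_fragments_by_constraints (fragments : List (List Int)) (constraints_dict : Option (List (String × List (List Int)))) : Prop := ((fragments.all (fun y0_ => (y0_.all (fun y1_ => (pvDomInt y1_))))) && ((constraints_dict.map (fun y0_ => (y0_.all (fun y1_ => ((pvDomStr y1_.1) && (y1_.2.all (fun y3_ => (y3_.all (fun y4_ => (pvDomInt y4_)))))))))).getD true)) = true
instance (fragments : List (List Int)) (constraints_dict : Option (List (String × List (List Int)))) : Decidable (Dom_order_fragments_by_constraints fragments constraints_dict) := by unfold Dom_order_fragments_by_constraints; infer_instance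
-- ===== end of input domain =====

-- B replaces A's per-constraint scan over all fragments (per-atom membership tests against every
-- fragment) by an inverted atom → fragment-index dict built once: each constraint's holder
-- fragments are the intersection of the index sets of its atoms, and a counts table is updated in
-- place for exactly those fragments.

-- ===== PORT A =====
-- counters[i][constraint_type[0]] += 1 : if constraint_type is empty Python raises IndexError, and
-- if the 1-char key is absent it raises KeyError — both reachable only outside Pre_; this port is
-- exact under Pre_ (the key is present, so Dict.modify with default 0 is Python's d[k] += 1).
def pvA_bump (cs : List (PySem.Dict String Int)) (i : Int) (ctype : String) : List (PySem.Dict String Int) :=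
  match PySem.Str.pyGet? ctype 0 with
  | some c => PySem.List.pySetD cs i
      ((PySem.List.pyGetD cs i PySem.Dict.empty).modify (String.singleton c) 0 (· + 1))
  | none => cs

-- the triple loop: for constraint_type, constraint_list in items / for constraint in the list /
-- for i, fragment in enumerate(fragments): if all([c in fragment for c in constraint]): bump
def pvA_loop (fragments : List (List Int)) (constraints : List (String × List (List Int)))
    (cs0 : List (PySem.Dict String Int)) : List (PySem.Dict String Int) :=
  constraints.foldl (fun cs p =>
    p.2.foldl (fun cs constraint =>
      (PySem.List.enumerate fragments).foldl (fun cs pr =>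
        if constraint.all (fun c => pr.2.contains c) then pvA_bump cs pr.1 p.1 else cs) cs) cs) cs0

def order_fragments_by_constraints (fragments : List (List Int)) (constraints_dict : Option (List (String × List (List Int)))) : List (List Int) :=
  match constraints_dict with
  | none => fragments
  | some constraints =>
    if PySem.List.len fragments = 0 then fragments else
    -- for i in range(len(fragments)): append {'R': 0, 'A': 0, 'D': 0, 'i': i}
    let cs0 := (PySem.List.pyRange 0 (PySem.List.len fragments)).foldl (fun acc i =>
      acc ++ [((((PySem.Dict.empty.insert "R" (0 : Int)).insert "A" 0).insert "D" 0).insert "i" i)]) []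
    let cs := pvA_loop fragments constraints cs0
    -- .sort(key=operator.itemgetter('R', 'A', 'D')): stable, lexicographic tuple key (keys always present)
    -- the tuple key (d['R'], d['A'], d['D']) is encoded as the 3-element list [R, A, D]:
    -- Python's tuple comparison and Lean's List lexicographic < agree on equal-length lists
    let sortedCs := PySem.List.sorted cs
      (fun d => [d.getD "R" 0, d.getD "A" 0, d.getD "D" 0]) false
    let newOrder := sortedCs.map (fun d => d.getD "i" 0)
    -- new_fragments = [[]] * len(fragments); for fragment, i in zip(fragments, new_order): new_fragments[i] = fragment
    let newFragments := PySem.List.pyRepeat [([] : List Int)] (PySem.List.len fragments)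
    (fragments.zip newOrder).foldl (fun nf pr => PySem.List.pySetD nf pr.2 pr.1) newFragments

-- ===== PORT B =====
-- atom_to_frags.setdefault(atom, set()).add(idx): d[atom] becomes d.get(atom, set()) with idx added
def pvB_index (fragments : List (List Int)) : PySem.Dict Int (PySem.Set Int) :=
  (PySem.List.enumerate fragments).foldl (fun m pr =>
    pr.2.foldl (fun m atom => m.modify atom PySem.Set.empty (fun s => PySem.Set.add s pr.1)) m)
    PySem.Dict.empty

-- cols = {'R': 0, 'A': 1, 'D': 2}
def pvB_cols : PySem.Dict String Int :=
  ((PySem.Dict.empty.insert "R" (0 : Int)).insert "A" 1).insert "D" 2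

-- holders = universe; for atom in constraint: holders = holders & atom_to_frags.get(atom, set())
def pvB_holders (m : PySem.Dict Int (PySem.Set Int)) (uni : PySem.Set Int)
    (constraint : List Int) : PySem.Set Int :=
  constraint.foldl (fun h atom => PySem.Set.inter h (m.getD atom PySem.Set.empty)) uni

-- counts[idx][col] += 1  (the in-place row update; iteration over the holders set is
-- order-independent: each distinct index gets one increment)
def pvB_rowBump (col : Int) (row : List Int) : List Int :=
  PySem.List.pySetD row col (PySem.List.pyGetD row col 0 + 1)

def pvB_bump (counts : List (List Int)) (idx col : Int) : List (List Int) :=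
  PySem.List.pySetD counts idx (pvB_rowBump col (PySem.List.pyGetD counts idx []))

-- the body of 'for constraint_type, constraint_list in constraints_dict.items()':
-- col = cols.get(constraint_type[:1]); if col is None: continue; else the two inner loops
def pvB_applyPair (m : PySem.Dict Int (PySem.Set Int)) (uni : PySem.Set Int)
    (counts : List (List Int)) (p : String × List (List Int)) : List (List Int) :=
  match pvB_cols.get? (PySem.Str.slice p.1 none (some 1)) with
  | none => counts
  | some col => p.2.foldl (fun counts constraint =>
      (pvB_holders m uni constraint).foldl (fun cs idx => pvB_bump cs idx col) counts) counts

def order_fragments_by_constraints_alt (fragments : List (List Int)) (constraints_dict : Option (List (String × List (List Int)))) : List (List Int) :=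
  match constraints_dict with
  | none => fragments
  | some constraints =>
    if fragments = [] then fragments else
    let m := pvB_index fragments
    let uni := PySem.Set.ofList (PySem.List.pyRange 0 (PySem.List.len fragments))
    -- counts = [[0, 0, 0] for _ in range(n)]
    let counts0 := (PySem.List.pyRange 0 (PySem.List.len fragments)).map (fun _ => [(0 : Int), 0, 0])
    let counts := constraints.foldl (pvB_applyPair m uni) counts0
    -- order = sorted(range(n), key=lambda i: counts[i])
    let order := PySem.List.sorted (PySem.List.pyRange 0 (PySem.List.len fragments))
      (fun i => PySem.List.pyGetD counts i []) false
    -- result = [[] for _ in range(n)]; for i, fragment in zip(order, fragments): result[i] = fragment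
    let result := (PySem.List.pyRange 0 (PySem.List.len fragments)).map (fun _ => ([] : List Int))
    (order.zip fragments).foldl (fun res pr => PySem.List.pySetD res pr.1 pr.2) result

-- ===== PRECONDITION & SPEC =====
-- Pre_ excludes inputs where some constraint contained in some fragment sits under a dict key whose
-- first character is not 'R'/'A'/'D': there A raises KeyError (or IndexError on an empty key),
-- except for keys starting with 'i', where A's increment lands on the stored original index and the
-- returned order (when the corrupted indices stay in range) is an accident of A's counter dict.
def Pre_order_fragments_by_constraints (fragments : List (List Int)) (constraints_dict : Option (List (String × List (List Int)))) : Prop :=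
  ∀ p ∈ constraints_dict.getD [],
    (p.1.toList.head? = some 'R' ∨ p.1.toList.head? = some 'A' ∨ p.1.toList.head? = some 'D')
    ∨ ∀ c ∈ p.2, ∀ f ∈ fragments, ¬ (∀ x ∈ c, x ∈ f)
instance (fragments : List (List Int)) (constraints_dict : Option (List (String × List (List Int)))) : Decidable (Pre_order_fragments_by_constraints fragments constraints_dict) := by unfold Pre_order_fragments_by_constraints; infer_instance
def pvWitness_order_fragments_by_constraints : List (List Int) × (Option (List (String × List (List Int)))) :=
  ([[0, 1], [2]], some [("R_1", [[2]]), ("A", [[0, 1]])])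
def Spec_order_fragments_by_constraints (fragments : List (List Int)) (constraints_dict : Option (List (String × List (List Int)))) (out : List (List Int)) : Prop := out = order_fragments_by_constraints_alt fragments constraints_dict
instance (fragments : List (List Int)) (constraints_dict : Option (List (String × List (List Int)))) (out : List (List Int)) : Decidable (Spec_order_fragments_by_constraints fragments constraints_dict out) := by unfold Spec_order_fragments_by_constraints; infer_instance

-- ===== CLAIM (what is proved, stated in full; the proofs are below) =====
def Claim_equal_order_fragments_by_constraints : Prop := ∀ (fragments : List (List Int)) (constraints_dict : Option (List (String × List (List Int)))), Dom_order_fragments_by_constraints fragments constraints_dict → Pre_order_fragments_by_constraints fragments constraints_dict → Spec_order_fragments_by_constraints fragments constraints_dict (order_fragments_by_constraints fragments constraints_dict)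

-- ===== LEMMAS AND PROOFS =====

-- the common specification both proofs converge to: per fragment f, one (key, constraint_list)
-- pair contributes countP (c ⊆ f) to the slot named by the key's first character
def pvCnt (f : List Int) (p : String × List (List Int)) : Int :=
  (p.2.countP (fun c => c.all (fun x => f.contains x)) : Int)

def pvKstep (f : List Int) (rad : Int × Int × Int) (p : String × List (List Int)) : Int × Int × Int :=
  if p.1.toList.head? = some 'R' then (rad.1 + pvCnt f p, rad.2.1, rad.2.2)
  else if p.1.toList.head? = some 'A' then (rad.1, rad.2.1 + pvCnt f p, rad.2.2)
  else if p.1.toList.head? = some 'D' then (rad.1, rad.2.1, rad.2.2 + pvCnt f p)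
  else rad

def pvKey (constraints : List (String × List (List Int))) (f : List Int) : Int × Int × Int :=
  constraints.foldl (pvKstep f) (0, 0, 0)

def pvRow (rad : Int × Int × Int) : List Int := [rad.1, rad.2.1, rad.2.2]

-- ---- A-side lemmas ----

-- the update one (key, constraint) pair applies to one fragment's counter dict
def pvBump1 (ctype : String) (d : PySem.Dict String Int) : PySem.Dict String Int :=
  match PySem.Str.pyGet? ctype 0 with
  | some c => d.modify (String.singleton c) 0 (· + 1)
  | none => d

-- A's whole triple loop, restricted to one fragment's counter dict
def pvPerFrag (constraints : List (String × List (List Int))) (f : List Int) (d : PySem.Dict String Int) : PySem.Dict String Int :=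
  constraints.foldl (fun d p =>
    p.2.foldl (fun d c => if c.all (fun x => f.contains x) then pvBump1 p.1 d else d) d) d

theorem pv_strSlice1 (s : String) (c : Char) (h : s.toList.head? = some c) :
    PySem.Str.slice s none (some 1) = String.singleton c := by
  apply String.ext
  simp [PySem.Str.slice]
  rw [PySem.List.slice_to s.toList (b := 1) (by omega)]
  cases hs : s.toList with
  | nil => simp [hs] at h
  | cons a t => simp [hs] at h; simp [h]

theorem pv_strSlice_nil (s : String) (h : s.toList.head? = none) :
    PySem.Str.slice s none (some 1) = "" := by
  apply String.ext
  simp [PySem.Str.slice]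
  rw [PySem.List.slice_to s.toList (b := 1) (by omega)]
  rw [List.head?_eq_none_iff] at h
  simp [h]

theorem pv_pyGet0 (s : String) : PySem.Str.pyGet? s 0 = s.toList.head? := by
  have := PySem.Str.pyGet?_natCast s 0
  simpa [List.head?_eq_getElem?] using this

-- A's enumerate-fold acts pointwise on the counter list
theorem pv_enumFold (constraint : List Int) (ctype : String) :
    ∀ (fr : List (List Int)) (pre cs : List (PySem.Dict String Int)), cs.length = fr.length →
    (PySem.List.enumerate fr (pre.length : Int)).foldl (fun cs pr =>
        if constraint.all (fun c => pr.2.contains c) then pvA_bump cs pr.1 ctype else cs) (pre ++ cs)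
      = pre ++ List.zipWith (fun f d => if constraint.all (fun x => f.contains x) then pvBump1 ctype d else d) fr cs := by
  intro fr
  induction fr with
  | nil => intro pre cs h; simp at h; simp [h, PySem.List.enumerate]
  | cons f ft ih =>
    intro pre cs h
    cases cs with
    | nil => simp at h
    | cons d dt =>
      simp only [PySem.List.enumerate, List.foldl_cons, List.zipWith_cons_cons]
      have hstep : (if constraint.all (fun c => f.contains c) then pvA_bump (pre ++ d :: dt) (pre.length : Int) ctype else (pre ++ d :: dt))
          = pre ++ (if constraint.all (fun x => f.contains x) then pvBump1 ctype d else d) :: dt := by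
        split
        · unfold pvA_bump pvBump1
          cases PySem.Str.pyGet? ctype 0 with
          | none => rfl
          | some c =>
            simp only []
            have hget : PySem.List.pyGetD (pre ++ d :: dt) (pre.length : Int) PySem.Dict.empty = d := by
              simp [PySem.List.pyGetD]
            rw [hget, PySem.List.pySetD_natCast]
            rw [List.set_append]
            simp
        · rfl
      rw [hstep]
      have harr : ((pre.length : Int) + 1) = (((pre ++ [(if constraint.all (fun x => f.contains x) then pvBump1 ctype d else d)]).length : Nat) : Int) := by
        simp
      rw [harr]
      have := ih (pre ++ [(if constraint.all (fun x => f.contains x) then pvBump1 ctype d else d)]) dt (by simpa using h)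
      simpa using this

theorem pv_zipWith_zipWith {α β : Type} (g h : α → β → β) (fr : List α) (cs : List β) :
    List.zipWith g fr (List.zipWith h fr cs) = List.zipWith (fun f d => g f (h f d)) fr cs := by
  induction fr generalizing cs with
  | nil => simp
  | cons f fr ih => cases cs <;> simp [ih]

theorem pv_zipWith_id {α β : Type} (fr : List α) (cs : List β) (h : cs.length = fr.length) :
    List.zipWith (fun _ d => d) fr cs = cs := by
  induction fr generalizing cs with
  | nil => simp at h; simp [h]
  | cons f fr ih => cases cs with
    | nil => simp at h
    | cons d dt => simp at h; simp [ih dt h]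

theorem pv_zipWith_self {α β : Type} (f : α → α → β) (l : List α) :
    List.zipWith f l l = l.map (fun x => f x x) := by
  induction l with
  | nil => rfl
  | cons x xs ih => simp

theorem pv_clistFold (fragments : List (List Int)) (ctype : String) :
    ∀ (clist : List (List Int)) (cs : List (PySem.Dict String Int)), cs.length = fragments.length →
    clist.foldl (fun cs constraint =>
      (PySem.List.enumerate fragments).foldl (fun cs pr =>
        if constraint.all (fun c => pr.2.contains c) then pvA_bump cs pr.1 ctype else cs) cs) cs
    = List.zipWith (fun f d => clist.foldl (fun d c => if c.all (fun x => f.contains x) then pvBump1 ctype d else d) d) fragments cs := by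
  intro clist
  induction clist with
  | nil => intro cs h; simp [pv_zipWith_id fragments cs h]
  | cons c ct ih =>
    intro cs h
    simp only [List.foldl_cons]
    have h0 := pv_enumFold c ctype fragments [] cs h
    simp only [List.length_nil, Nat.cast_zero, List.nil_append] at h0
    rw [h0, ih _ (by simp [List.length_zipWith, h]), pv_zipWith_zipWith]

theorem pv_loop_eq_zipWith (fragments : List (List Int)) (constraints : List (String × List (List Int))) :
    ∀ cs0, cs0.length = fragments.length →
    pvA_loop fragments constraints cs0 = List.zipWith (fun f d => pvPerFrag constraints f d) fragments cs0 := by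
  induction constraints with
  | nil => intro cs0 h; unfold pvA_loop pvPerFrag; simp [pv_zipWith_id fragments cs0 h]
  | cons p C ih =>
    intro cs0 h
    unfold pvA_loop pvPerFrag
    simp only [List.foldl_cons]
    rw [pv_clistFold fragments p.1 p.2 cs0 h]
    have := ih (List.zipWith (fun f d => p.2.foldl (fun d c => if c.all (fun x => f.contains x) then pvBump1 p.1 d else d) d) fragments cs0) (by simp [List.length_zipWith, h])
    unfold pvA_loop pvPerFrag at this
    rw [this, pv_zipWith_zipWith]

-- the triple-component shift law of the spec fold
theorem pv_shift (C : List (String × List (List Int))) (f : List Int) :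
    ∀ rad : Int × Int × Int, C.foldl (pvKstep f) rad =
      (rad.1 + (C.foldl (pvKstep f) (0,0,0)).1,
       rad.2.1 + (C.foldl (pvKstep f) (0,0,0)).2.1,
       rad.2.2 + (C.foldl (pvKstep f) (0,0,0)).2.2) := by
  induction C with
  | nil => intro rad; simp
  | cons p C ih =>
    intro rad
    simp only [List.foldl_cons]
    rw [ih (pvKstep f rad p), ih (pvKstep f (0,0,0) p)]
    unfold pvKstep
    dsimp only
    split_ifs <;> simp <;> omega

theorem pv_foldl_id {α β : Type} (l : List α) (d : β) : l.foldl (fun d _ => d) d = d := by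
  induction l generalizing d <;> simp_all

-- one key's inner fold, A side: only the bumped slot changes, by the number of matches
theorem pv_foldl_modify_if (key : String) (P : List (List Int)) (pred : List Int → Bool) (k : String) :
    ∀ d : PySem.Dict String Int,
    (P.foldl (fun d c => if pred c then d.modify key 0 (· + 1) else d) d).getD k 0
      = d.getD k 0 + (if k = key then (P.countP pred : Int) else 0) := by
  induction P with
  | nil => intro d; simp
  | cons c P ih =>
    intro d
    simp only [List.foldl_cons]
    rw [ih]
    by_cases hp : pred c
    · rw [if_pos hp, PySem.Dict.getD_modify, List.countP_cons]
      split_ifs with hk <;> simp [hk]; omega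
    · rw [if_neg hp, List.countP_cons]
      simp [hp]

theorem pv_inner_getD (p : String × List (List Int)) (f : List Int)
    (hp : (p.1.toList.head? = some 'R' ∨ p.1.toList.head? = some 'A' ∨ p.1.toList.head? = some 'D')
        ∨ ∀ c ∈ p.2, ¬ (∀ x ∈ c, x ∈ f)) (d : PySem.Dict String Int) :
    (p.2.foldl (fun d c => if c.all (fun x => f.contains x) then pvBump1 p.1 d else d) d).getD "R" 0
        = d.getD "R" 0 + (pvKstep f (0,0,0) p).1
    ∧ (p.2.foldl (fun d c => if c.all (fun x => f.contains x) then pvBump1 p.1 d else d) d).getD "A" 0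
        = d.getD "A" 0 + (pvKstep f (0,0,0) p).2.1
    ∧ (p.2.foldl (fun d c => if c.all (fun x => f.contains x) then pvBump1 p.1 d else d) d).getD "D" 0
        = d.getD "D" 0 + (pvKstep f (0,0,0) p).2.2
    ∧ (p.2.foldl (fun d c => if c.all (fun x => f.contains x) then pvBump1 p.1 d else d) d).getD "i" 0
        = d.getD "i" 0 := by
  rcases hp with hch | hnm
  · -- the key's first character is 'R' / 'A' / 'D'
    have hg : PySem.Str.pyGet? p.1 0 = p.1.toList.head? := pv_pyGet0 p.1
    rcases hch with h | h | h
    · simp only [pvBump1, hg, h]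
      unfold pvKstep pvCnt
      rw [if_pos h]
      simp only [show String.singleton 'R' = "R" from rfl, pv_foldl_modify_if]
      simp
    · simp only [pvBump1, hg, h]
      unfold pvKstep pvCnt
      rw [if_neg (by simp [h]), if_pos h]
      simp only [show String.singleton 'A' = "A" from rfl, pv_foldl_modify_if]
      simp
    · simp only [pvBump1, hg, h]
      unfold pvKstep pvCnt
      rw [if_neg (by simp [h]), if_neg (by simp [h]), if_pos h]
      simp only [show String.singleton 'D' = "D" from rfl, pv_foldl_modify_if]
      simp
  · -- no constraint of this key is contained in f: nothing fires on either side
    have hall : ∀ c ∈ p.2, (c.all (fun x => f.contains x)) = false := by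
      intro c hc
      rw [← Bool.not_eq_true, List.all_eq_true]
      simpa using hnm c hc
    have hA : p.2.foldl (fun d c => if c.all (fun x => f.contains x) then pvBump1 p.1 d else d) d = d := by
      rw [PySem.List.foldl_congr_mem _ _ (fun d _ => d) d (by intro acc c hc; rw [hall c hc]; simp)]
      exact pv_foldl_id _ _
    have hn : pvCnt f p = 0 := by
      unfold pvCnt
      rw [List.countP_eq_zero.mpr (by intro c hc; rw [hall c hc]; simp)]
      rfl
    unfold pvKstep
    rw [hA, hn]
    split_ifs <;> simp

-- the counts the A-side dict carries are exactly the spec key, and the 'i' slot is untouched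
theorem pv_perFrag_getD (f : List Int) (C : List (String × List (List Int)))
    (hC : ∀ p ∈ C, (p.1.toList.head? = some 'R' ∨ p.1.toList.head? = some 'A' ∨ p.1.toList.head? = some 'D')
        ∨ ∀ c ∈ p.2, ¬ (∀ x ∈ c, x ∈ f)) :
    ∀ d : PySem.Dict String Int,
      (pvPerFrag C f d).getD "R" 0 = d.getD "R" 0 + (pvKey C f).1
      ∧ (pvPerFrag C f d).getD "A" 0 = d.getD "A" 0 + (pvKey C f).2.1
      ∧ (pvPerFrag C f d).getD "D" 0 = d.getD "D" 0 + (pvKey C f).2.2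
      ∧ (pvPerFrag C f d).getD "i" 0 = d.getD "i" 0 := by
  induction C with
  | nil => intro d; simp [pvPerFrag, pvKey]
  | cons p C ih =>
    intro d
    have hp := hC p (by simp)
    have ihd := ih (fun q hq => hC q (by simp [hq]))
      (p.2.foldl (fun d c => if c.all (fun x => f.contains x) then pvBump1 p.1 d else d) d)
    obtain ⟨iR, iA, iD, iI⟩ := pv_inner_getD p f hp d
    obtain ⟨jR, jA, jD, jI⟩ := ihd
    have hkey : pvKey (p :: C) f =
        ((pvKstep f (0,0,0) p).1 + (pvKey C f).1,
         (pvKstep f (0,0,0) p).2.1 + (pvKey C f).2.1,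
         (pvKstep f (0,0,0) p).2.2 + (pvKey C f).2.2) := by
      unfold pvKey
      simp only [List.foldl_cons]
      rw [pv_shift]
    have hfold : pvPerFrag (p :: C) f d
        = pvPerFrag C f (p.2.foldl (fun d c => if c.all (fun x => f.contains x) then pvBump1 p.1 d else d) d) := by
      unfold pvPerFrag
      simp [List.foldl_cons]
    rw [hfold, hkey]
    refine ⟨?_, ?_, ?_, ?_⟩
    · rw [jR, iR]; ring
    · rw [jA, iA]; ring
    · rw [jD, iD]; ring
    · rw [jI, iI]

-- ---- B-side lemmas ----

-- membership in one fragment's pass over the index dict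
theorem pv_index_mem_one (f : List Int) (i : Int) :
    ∀ (m : PySem.Dict Int (PySem.Set Int)) (x j : Int),
    j ∈ (f.foldl (fun m atom => m.modify atom PySem.Set.empty (fun s => PySem.Set.add s i)) m).getD x PySem.Set.empty
    ↔ j ∈ m.getD x PySem.Set.empty ∨ (j = i ∧ x ∈ f) := by
  induction f with
  | nil => intro m x j; simp
  | cons a f ih =>
    intro m x j
    simp only [List.foldl_cons]
    rw [ih, PySem.Dict.getD_modify]
    by_cases hxa : x = a
    · rw [if_pos hxa, PySem.Set.mem_add]
      subst hxa
      simp only [List.mem_cons]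
      tauto
    · rw [if_neg hxa]
      simp only [List.mem_cons]
      constructor
      · rintro (hm | ⟨rfl, hx⟩)
        · exact Or.inl hm
        · exact Or.inr ⟨rfl, Or.inr hx⟩
      · rintro (hm | ⟨rfl, (rfl | hx)⟩)
        · exact Or.inl hm
        · exact absurd rfl hxa
        · exact Or.inr ⟨rfl, hx⟩

theorem pv_index_mem_aux (fr : List (List Int)) :
    ∀ (s : Int) (m : PySem.Dict Int (PySem.Set Int)) (x j : Int),
    j ∈ ((PySem.List.enumerate fr s).foldl (fun m pr =>
        pr.2.foldl (fun m atom => m.modify atom PySem.Set.empty (fun st => PySem.Set.add st pr.1)) m) m).getD x PySem.Set.empty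
    ↔ j ∈ m.getD x PySem.Set.empty ∨ ∃ k : Nat, k < fr.length ∧ j = s + (k : Int) ∧ x ∈ fr.getD k [] := by
  induction fr with
  | nil => intro s m x j; simp [PySem.List.enumerate]
  | cons f ft ih =>
    intro s m x j
    simp only [PySem.List.enumerate, List.foldl_cons]
    rw [ih (s + 1), pv_index_mem_one]
    constructor
    · rintro ((hm | ⟨hj, hx⟩) | ⟨k, hk, hj, hx⟩)
      · exact Or.inl hm
      · exact Or.inr ⟨0, by simp, by simpa using hj, by simpa using hx⟩
      · exact Or.inr ⟨k + 1, by simpa using hk, by push_cast at hj ⊢; omega, by simpa using hx⟩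
    · rintro (hm | ⟨k, hk, hj, hx⟩)
      · exact Or.inl (Or.inl hm)
      · cases k with
        | zero => exact Or.inl (Or.inr ⟨by simpa using hj, by simpa using hx⟩)
        | succ k => exact Or.inr ⟨k, by simpa using hk, by push_cast at hj ⊢; omega, by simpa using hx⟩

theorem pv_index_mem (fragments : List (List Int)) (x j : Int) :
    j ∈ (pvB_index fragments).getD x PySem.Set.empty
    ↔ 0 ≤ j ∧ j < (fragments.length : Int) ∧ x ∈ PySem.List.pyGetD fragments j [] := by
  unfold pvB_index
  rw [pv_index_mem_aux fragments 0 PySem.Dict.empty x j]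
  simp only [PySem.Dict.getD_empty]
  constructor
  · rintro (h | ⟨k, hk, hj, hx⟩)
    · simp [PySem.Set.empty] at h
    · have hj' : j = (k : Int) := by omega
      subst hj'
      refine ⟨by positivity, by exact_mod_cast hk, ?_⟩
      rw [PySem.List.pyGetD_natCast]
      exact hx
  · rintro ⟨h0, h1, hx⟩
    right
    refine ⟨j.toNat, by omega, by omega, ?_⟩
    rw [PySem.List.pyGetD_of_nonneg _ _ h0] at hx
    exact hx

theorem pv_holders_mem (m : PySem.Dict Int (PySem.Set Int)) (c : List Int) :
    ∀ (u : PySem.Set Int) (j : Int),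
    j ∈ pvB_holders m u c ↔ j ∈ u ∧ ∀ x ∈ c, j ∈ m.getD x PySem.Set.empty := by
  induction c with
  | nil => intro u j; simp [pvB_holders]
  | cons a c ih =>
    intro u j
    unfold pvB_holders at *
    simp only [List.foldl_cons]
    rw [ih]
    rw [PySem.Set.mem_inter]
    simp only [List.mem_cons]
    constructor
    · rintro ⟨⟨hu, ha⟩, hall⟩
      exact ⟨hu, by rintro x (rfl | hx); exact ha; exact hall x hx⟩
    · rintro ⟨hu, hall⟩
      exact ⟨⟨hu, hall a (Or.inl rfl)⟩, fun x hx => hall x (Or.inr hx)⟩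

theorem pv_holders_nodup (m : PySem.Dict Int (PySem.Set Int)) (c : List Int) :
    ∀ (u : PySem.Set Int), u.Nodup → (pvB_holders m u c).Nodup := by
  induction c with
  | nil => intro u hu; simpa [pvB_holders] using hu
  | cons a c ih =>
    intro u hu
    unfold pvB_holders at *
    simp only [List.foldl_cons]
    exact ih _ (PySem.Set.nodup_inter _ _ hu)

-- the bump fold over a duplicate-free, in-range holders list acts pointwise
theorem pv_bump_fold (col : Int) :
    ∀ (h : List Int) (counts : List (List Int)), h.Nodup →
    (∀ j ∈ h, 0 ≤ j ∧ j < (counts.length : Int)) →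
    (h.foldl (fun cs idx => pvB_bump cs idx col) counts).length = counts.length ∧
    ∀ k : Nat, k < counts.length →
      (h.foldl (fun cs idx => pvB_bump cs idx col) counts).getD k [] =
        if (k : Int) ∈ h then pvB_rowBump col (counts.getD k []) else counts.getD k [] := by
  intro h
  induction h with
  | nil => intro counts _ _; simp
  | cons j h ih =>
    intro counts hnd hrange
    obtain ⟨hj0, hj1⟩ := hrange j (by simp)
    have hjlt : j.toNat < counts.length := by omega
    have hstep : pvB_bump counts j col = counts.set j.toNat (pvB_rowBump col (counts.getD j.toNat [])) := by
      unfold pvB_bump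
      rw [PySem.List.pySetD_of_nonneg _ _ hj0,
          PySem.List.pyGetD_eq_getElem _ _ hj0 (by exact_mod_cast hj1)]
      rw [List.getD_eq_getElem counts [] hjlt]
    have hlen1 : (counts.set j.toNat (pvB_rowBump col (counts.getD j.toNat []))).length = counts.length := by
      simp
    obtain ⟨ihlen, ihget⟩ := ih (counts.set j.toNat (pvB_rowBump col (counts.getD j.toNat [])))
      (hnd.of_cons)
      (by intro i hi; rw [hlen1]; exact hrange i (by simp [hi]))
    simp only [List.foldl_cons, hstep]
    refine ⟨by rw [ihlen, hlen1], ?_⟩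
    intro k hk
    rw [ihget k (by rw [hlen1]; exact hk)]
    by_cases hkj : (k : Int) = j
    · have hkj' : k = j.toNat := by omega
      have hknotin : (k : Int) ∉ h := by
        rw [hkj]
        exact (List.nodup_cons.mp hnd).1
      rw [if_neg hknotin, if_pos (by simp [hkj])]
      subst hkj'
      rw [List.getD_eq_getElem _ [] (by rw [hlen1]; exact hk)]
      rw [List.getElem_set_self (by simpa using hk)]
    · have hsame : (counts.set j.toNat (pvB_rowBump col (counts.getD j.toNat []))).getD k []
          = counts.getD k [] := by
        rw [List.getD_eq_getElem _ [] (by rw [hlen1]; exact hk), List.getD_eq_getElem _ [] hk,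
            List.getElem_set_ne (by omega)]
      by_cases hmem : (k : Int) ∈ h
      · rw [if_pos hmem, if_pos (by simp [hmem]), hsame]
      · rw [if_neg hmem, if_neg (by simp [hkj, hmem]), hsame]

-- one row's if-fold accumulates a countP into one slot
theorem pv_row_fold (col : Int) (pred : List Int → Prop) [DecidablePred pred] :
    ∀ (P : List (List Int)) (row : List Int), 0 ≤ col → col.toNat < row.length →
    P.foldl (fun r c => if pred c then pvB_rowBump col r else r) row
      = row.set col.toNat (row.getD col.toNat 0 + (P.countP (fun c => decide (pred c)) : Int)) := by
  intro P
  induction P with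
  | nil =>
    intro row h0 h1
    simp only [List.foldl_nil, List.countP_nil, Nat.cast_zero, add_zero]
    rw [List.getD_eq_getElem _ 0 h1, List.set_getElem_self]
  | cons c P ih =>
    intro row h0 h1
    simp only [List.foldl_cons, List.countP_cons]
    have hbump : pvB_rowBump col row = row.set col.toNat (row.getD col.toNat 0 + 1) := by
      unfold pvB_rowBump
      rw [PySem.List.pySetD_of_nonneg _ _ h0,
          PySem.List.pyGetD_eq_getElem _ _ h0 (by omega)]
      rw [List.getD_eq_getElem row 0 h1]
    by_cases hp : pred c
    · rw [if_pos hp, hbump, ih _ h0 (by simpa using h1)]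
      rw [List.set_set]
      congr 1
      rw [List.getD_eq_getElem _ 0 (by simpa using h1), List.getElem_set_self (by simpa using h1),
          List.getD_eq_getElem _ 0 h1]
      simp [hp]
      ring
    · rw [if_neg hp, ih _ h0 h1]
      simp [hp]

-- the two inner loops of one dict item act pointwise on the counts table
theorem pv_clist_bump (m : PySem.Dict Int (PySem.Set Int)) (u : PySem.Set Int) (hu : u.Nodup)
    (n : Nat) (hub : ∀ j ∈ u, 0 ≤ j ∧ j < (n : Int)) (col : Int) :
    ∀ (P : List (List Int)) (counts : List (List Int)), counts.length = n →
    (P.foldl (fun cs c => (pvB_holders m u c).foldl (fun cs idx => pvB_bump cs idx col) cs) counts).length = n ∧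
    ∀ k : Nat, k < n →
      (P.foldl (fun cs c => (pvB_holders m u c).foldl (fun cs idx => pvB_bump cs idx col) cs) counts).getD k []
        = P.foldl (fun row c => if (k : Int) ∈ pvB_holders m u c then pvB_rowBump col row else row) (counts.getD k []) := by
  intro P
  induction P with
  | nil => intro counts hlen; exact ⟨hlen, fun k _ => rfl⟩
  | cons c P ih =>
    intro counts hlen
    have hrange : ∀ j ∈ pvB_holders m u c, 0 ≤ j ∧ j < (counts.length : Int) := by
      intro j hj
      rw [hlen]
      exact hub j ((pv_holders_mem m c u j).mp hj).1
    obtain ⟨blen, bget⟩ := pv_bump_fold col (pvB_holders m u c) counts (pv_holders_nodup m c u hu) hrange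
    obtain ⟨ihlen, ihget⟩ := ih ((pvB_holders m u c).foldl (fun cs idx => pvB_bump cs idx col) counts)
      (by rw [blen, hlen])
    simp only [List.foldl_cons]
    refine ⟨ihlen, ?_⟩
    intro k hk
    rw [ihget k hk, bget k (by rw [hlen]; exact hk)]

-- one dict item applied to a pvRow-shaped counts table is pvKstep, pointwise
theorem pv_applyPair_spec (fragments : List (List Int)) (p : String × List (List Int))
    (g : Nat → Int × Int × Int) :
    ∀ (counts : List (List Int)), counts.length = fragments.length →
    (∀ k : Nat, k < fragments.length → counts.getD k [] = pvRow (g k)) →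
    (pvB_applyPair (pvB_index fragments) (PySem.Set.ofList (PySem.List.pyRange 0 (PySem.List.len fragments))) counts p).length = fragments.length ∧
    ∀ k : Nat, k < fragments.length →
      (pvB_applyPair (pvB_index fragments) (PySem.Set.ofList (PySem.List.pyRange 0 (PySem.List.len fragments))) counts p).getD k []
        = pvRow (pvKstep (PySem.List.pyGetD fragments (k : Int) []) (g k) p) := by
  intro counts hlen hrow
  have hU : PySem.Set.ofList (PySem.List.pyRange 0 (PySem.List.len fragments))
      = PySem.List.pyRange 0 (PySem.List.len fragments) :=
    PySem.Set.ofList_eq_self_of_nodup _ (PySem.List.nodup_pyRange_one 0 _)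
  have hmemU : ∀ j : Int, j ∈ PySem.Set.ofList (PySem.List.pyRange 0 (PySem.List.len fragments))
      ↔ 0 ≤ j ∧ j < (fragments.length : Int) := by
    intro j
    rw [hU, PySem.List.mem_pyRange_one, PySem.List.len_eq]
  have hUnodup : (PySem.Set.ofList (PySem.List.pyRange 0 (PySem.List.len fragments))).Nodup := by
    rw [hU]; exact PySem.List.nodup_pyRange_one 0 _
  have hub : ∀ j ∈ PySem.Set.ofList (PySem.List.pyRange 0 (PySem.List.len fragments)),
      0 ≤ j ∧ j < ((fragments.length : Nat) : Int) := by
    intro j hj; exact (hmemU j).mp hj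
  -- holder membership at index k is containment of the constraint in fragment k
  have hmemH : ∀ (c : List Int) (k : Nat), k < fragments.length →
      (((k : Int) ∈ pvB_holders (pvB_index fragments) (PySem.Set.ofList (PySem.List.pyRange 0 (PySem.List.len fragments))) c)
        ↔ c.all (fun x => (PySem.List.pyGetD fragments (k : Int) []).contains x) = true) := by
    intro c k hk
    rw [pv_holders_mem, hmemU]
    simp only [List.all_eq_true]
    constructor
    · rintro ⟨-, hall⟩ x hx
      have := (pv_index_mem fragments x (k : Int)).mp (hall x hx)
      simpa using this.2.2
    · intro hall
      refine ⟨⟨by positivity, by exact_mod_cast hk⟩, fun x hx => ?_⟩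
      rw [pv_index_mem]
      exact ⟨by positivity, by exact_mod_cast hk, by simpa using hall x hx⟩
  have hcnt : ∀ k : Nat, k < fragments.length →
      ∀ col : Int, (p.2.countP (fun c => decide ((k : Int) ∈ pvB_holders (pvB_index fragments) (PySem.Set.ofList (PySem.List.pyRange 0 (PySem.List.len fragments))) c)) : Int)
        = pvCnt (PySem.List.pyGetD fragments (k : Int) []) p := by
    intro k hk col
    unfold pvCnt
    congr 1
    apply List.countP_congr
    intro c _
    simp only [decide_eq_true_eq]
    exact hmemH c k hk
  unfold pvB_applyPair
  cases hh : p.1.toList.head? with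
  | none =>
    rw [pv_strSlice_nil p.1 hh]
    rw [show pvB_cols.get? "" = none from rfl]
    refine ⟨hlen, fun k hk => ?_⟩
    rw [hrow k hk]
    simp [pvKstep, hh]
  | some ch =>
    rw [pv_strSlice1 p.1 ch hh]
    have hsing : ∀ c' : Char, (String.singleton ch = String.singleton c') ↔ ch = c' := by
      intro c'
      constructor
      · intro h; have := congrArg String.toList h; simpa [String.singleton] using this
      · rintro rfl; rfl
    by_cases hR : ch = 'R'
    · subst hR
      rw [show String.singleton 'R' = "R" from rfl, show pvB_cols.get? "R" = some 0 from rfl]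
      obtain ⟨clen, cget⟩ := pv_clist_bump (pvB_index fragments) _ hUnodup fragments.length hub 0 p.2 counts hlen
      refine ⟨clen, fun k hk => ?_⟩
      rw [cget k hk, pv_row_fold 0 _ p.2 (counts.getD k []) (by omega) (by rw [hrow k hk]; simp [pvRow]),
          hrow k hk, hcnt k hk 0]
      simp [pvRow, pvKstep, hh]
    · by_cases hA : ch = 'A'
      · subst hA
        rw [show String.singleton 'A' = "A" from rfl, show pvB_cols.get? "A" = some 1 from rfl]
        obtain ⟨clen, cget⟩ := pv_clist_bump (pvB_index fragments) _ hUnodup fragments.length hub 1 p.2 counts hlen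
        refine ⟨clen, fun k hk => ?_⟩
        rw [cget k hk, pv_row_fold 1 _ p.2 (counts.getD k []) (by omega) (by rw [hrow k hk]; simp [pvRow]),
            hrow k hk, hcnt k hk 1]
        simp [pvRow, pvKstep, hh, hR]
      · by_cases hD : ch = 'D'
        · subst hD
          rw [show String.singleton 'D' = "D" from rfl, show pvB_cols.get? "D" = some 2 from rfl]
          obtain ⟨clen, cget⟩ := pv_clist_bump (pvB_index fragments) _ hUnodup fragments.length hub 2 p.2 counts hlen
          refine ⟨clen, fun k hk => ?_⟩
          rw [cget k hk, pv_row_fold 2 _ p.2 (counts.getD k []) (by omega) (by rw [hrow k hk]; simp [pvRow]),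
              hrow k hk, hcnt k hk 2]
          simp [pvRow, pvKstep, hh, hR, hA]
        · rw [show pvB_cols.get? (String.singleton ch) = none by
            rw [pvB_cols, PySem.Dict.get?_insert, if_neg (by simpa using (hsing 'D').not.mpr hD),
                PySem.Dict.get?_insert, if_neg (by simpa using (hsing 'A').not.mpr hA),
                PySem.Dict.get?_insert, if_neg (by simpa using (hsing 'R').not.mpr hR)]
            rfl]
          refine ⟨hlen, fun k hk => ?_⟩
          rw [hrow k hk]
          simp [pvKstep, hh, hR, hA, hD]

-- the whole items loop of B computes the spec key, pointwise on the counts table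
theorem pv_counts_spec (fragments : List (List Int)) :
    ∀ (C : List (String × List (List Int))) (counts : List (List Int)) (g : Nat → Int × Int × Int),
    counts.length = fragments.length →
    (∀ k : Nat, k < fragments.length → counts.getD k [] = pvRow (g k)) →
    (C.foldl (pvB_applyPair (pvB_index fragments) (PySem.Set.ofList (PySem.List.pyRange 0 (PySem.List.len fragments)))) counts).length = fragments.length ∧
    ∀ k : Nat, k < fragments.length →
      (C.foldl (pvB_applyPair (pvB_index fragments) (PySem.Set.ofList (PySem.List.pyRange 0 (PySem.List.len fragments)))) counts).getD k []
        = pvRow (C.foldl (pvKstep (PySem.List.pyGetD fragments (k : Int) [])) (g k)) := by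
  intro C
  induction C with
  | nil => intro counts g hlen hrow; exact ⟨hlen, fun k hk => by simpa using hrow k hk⟩
  | cons p C ih =>
    intro counts g hlen hrow
    obtain ⟨alen, aget⟩ := pv_applyPair_spec fragments p g counts hlen hrow
    obtain ⟨ilen, iget⟩ := ih _ (fun k => pvKstep (PySem.List.pyGetD fragments (k : Int) []) (g k) p) alen aget
    simp only [List.foldl_cons]
    exact ⟨ilen, iget⟩

-- ---- sort and placement lemmas ----

theorem pv_insertBy_map {α β : Type} (G : α → β) (b : β → β → Bool) (x : α) :
    ∀ acc : List α, PySem.List.insertBy b (G x) (acc.map G)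
      = (PySem.List.insertBy (fun a c => b (G a) (G c)) x acc).map G := by
  intro acc
  induction acc with
  | nil => simp [PySem.List.insertBy]
  | cons y ys ih => simp [PySem.List.insertBy]; split <;> simp [ih]

theorem pv_sorted_map {α β κ : Type} [LT κ] [DecidableLT κ] (G : α → β) (key : β → κ) (l : List α) :
    PySem.List.sorted (l.map G) key false = (PySem.List.sorted l (fun a => key (G a)) false).map G := by
  rw [PySem.List.sorted_eq_foldl_insertBy, PySem.List.sorted_eq_foldl_insertBy, List.foldl_map]
  suffices h : ∀ (acc : List α), List.foldl (fun acc x => PySem.List.insertBy (fun a b => decide (key a < key b)) (G x) acc) (acc.map G) l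
      = (List.foldl (fun acc x => PySem.List.insertBy (fun a b => decide (key (G a) < key (G b))) x acc) acc l).map G by
    simpa using h []
  induction l with
  | nil => intro acc; simp
  | cons x xs ih => intro acc; simp only [List.foldl_cons, pv_insertBy_map, ih]

theorem pv_insertBy_congr {α : Type} (b1 b2 : α → α → Bool) (x : α) :
    ∀ acc : List α, (∀ y ∈ acc, b1 x y = b2 x y) →
      PySem.List.insertBy b1 x acc = PySem.List.insertBy b2 x acc := by
  intro acc
  induction acc with
  | nil => simp [PySem.List.insertBy]
  | cons y ys ih =>
    intro h
    simp only [PySem.List.insertBy]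
    rw [h y (by simp)]
    split
    · rfl
    · rw [ih (fun z hz => h z (by simp [hz]))]

theorem pv_sorted_key_congr {α κ : Type} [LT κ] [DecidableLT κ] (l : List α) (k1 k2 : α → κ)
    (h : ∀ x ∈ l, k1 x = k2 x) :
    PySem.List.sorted l k1 false = PySem.List.sorted l k2 false := by
  rw [PySem.List.sorted_eq_foldl_insertBy, PySem.List.sorted_eq_foldl_insertBy]
  suffices hs : ∀ (sub acc : List α), (∀ x ∈ sub, x ∈ l) → (∀ y ∈ acc, y ∈ l) →
      List.foldl (fun acc x => PySem.List.insertBy (fun a b => decide (k1 a < k1 b)) x acc) acc sub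
      = List.foldl (fun acc x => PySem.List.insertBy (fun a b => decide (k2 a < k2 b)) x acc) acc sub by
    exact hs l [] (fun _ hx => hx) (by simp)
  intro sub
  induction sub with
  | nil => intro acc _ _; rfl
  | cons x xs ih =>
    intro acc hsub hacc
    simp only [List.foldl_cons]
    rw [pv_insertBy_congr _ _ _ acc (fun y hy => by rw [h x (hsub x (by simp)), h y (hacc y hy)])]
    apply ih _ (fun z hz => hsub z (by simp [hz]))
    intro y hy
    rw [PySem.List.mem_insertBy] at hy
    rcases hy with rfl | hy
    · exact hsub _ (by simp)
    · exact hacc y hy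

theorem pv_map_range_getD {α : Type} (l : List α) (d : α) :
    (List.range l.length).map (fun k => l.getD k d) = l := by
  apply List.ext_getElem
  · simp
  · intro i h1 h2
    simp [List.getD_eq_getElem?_getD, List.getElem?_eq_getElem h2]

-- ===== VERDICT (by name: the statement is the Claim_ definition above) =====
theorem order_fragments_by_constraints_spec : Claim_equal_order_fragments_by_constraints := by
  intro fragments cd _ hPre
  unfold Spec_order_fragments_by_constraints
  cases cd with
  | none => rfl
  | some C =>
    simp only [order_fragments_by_constraints, order_fragments_by_constraints_alt]
    by_cases hf : fragments = []
    · subst hf; simp [PySem.List.len]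
    · have hne : PySem.List.len fragments ≠ 0 := by
        rw [PySem.List.len_eq]
        intro h
        exact hf (List.length_eq_zero_iff.mp (by exact_mod_cast h))
      rw [if_neg hne, if_neg hf]
      -- names
      set n := fragments.length with hn
      set L := PySem.List.pyRange 0 (PySem.List.len fragments) with hL
      set D0 : Int → PySem.Dict String Int :=
        (fun i => ((((PySem.Dict.empty.insert "R" (0 : Int)).insert "A" 0).insert "D" 0).insert "i" i)) with hD0
      have hlen' : PySem.List.len fragments = (n : Int) := PySem.List.len_eq fragments
      have hLlen : L.length = n := by
        rw [hL, PySem.List.length_pyRange_one, hlen']; simp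
      have hmemL : ∀ i ∈ L, 0 ≤ i ∧ i < (n : Int) := by
        intro i hi
        rw [hL, PySem.List.mem_pyRange_one, hlen'] at hi
        exact hi
      -- A's init list is a map over the range
      have hcs0 : (L.foldl (fun acc i => acc ++ [D0 i]) []) = L.map D0 := by
        rw [PySem.List.foldl_append_singleton_eq_map]; simp
      rw [hcs0]
      -- fragments as a map over the same range
      have hfrag : fragments = L.map (fun i => PySem.List.pyGetD fragments i []) := by
        rw [hL, PySem.List.pyRange_one, hlen']
        simp only [List.map_map, Int.sub_zero, Int.toNat_natCast]
        conv_lhs => rw [← pv_map_range_getD fragments []]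
        apply List.map_congr_left
        intro k _
        simp [Function.comp, PySem.List.pyGetD_natCast]
      -- A's counter list after the triple loop, as a map over the range
      have hcs : pvA_loop fragments C (L.map D0)
          = L.map (fun i => pvPerFrag C (PySem.List.pyGetD fragments i []) (D0 i)) := by
        rw [pv_loop_eq_zipWith fragments C (L.map D0) (by simp [hLlen, hn])]
        conv_lhs => rw [hfrag]
        rw [List.zipWith_map, pv_zipWith_self]
      rw [hcs]
      set G : Int → PySem.Dict String Int :=
        (fun i => pvPerFrag C (PySem.List.pyGetD fragments i []) (D0 i)) with hG
      -- per-index counts: the Pre_ hypothesis specialised to the fragment at index i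
      have hCati : ∀ i, 0 ≤ i → i < (n : Int) →
          ∀ p ∈ C, (p.1.toList.head? = some 'R' ∨ p.1.toList.head? = some 'A' ∨ p.1.toList.head? = some 'D')
            ∨ ∀ c ∈ p.2, ¬ (∀ x ∈ c, x ∈ PySem.List.pyGetD fragments i []) := by
        intro i h0 h1 p hp
        rcases hPre p hp with h | h
        · exact Or.inl h
        · refine Or.inr (fun c hc => h c hc _ ?_)
          exact PySem.List.pyGetD_mem fragments [] (by constructor <;> omega)
      have hgetG : ∀ i, 0 ≤ i → i < (n : Int) →
          (G i).getD "R" 0 = (pvKey C (PySem.List.pyGetD fragments i [])).1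
          ∧ (G i).getD "A" 0 = (pvKey C (PySem.List.pyGetD fragments i [])).2.1
          ∧ (G i).getD "D" 0 = (pvKey C (PySem.List.pyGetD fragments i [])).2.2
          ∧ (G i).getD "i" 0 = i := by
        intro i h0 h1
        obtain ⟨eR, eA, eD, eI⟩ := pv_perFrag_getD (PySem.List.pyGetD fragments i []) C (hCati i h0 h1) (D0 i)
        rw [hG]
        dsimp only
        rw [eR, eA, eD, eI]
        refine ⟨?_, ?_, ?_, ?_⟩ <;> simp [hD0, PySem.Dict.getD_insert]
      -- the sort: A sorts the mapped dicts, i.e. sorts the range by the composed key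
      rw [pv_sorted_map G _ L]
      rw [List.map_map]
      -- A's extracted order equals the range sorted by the composed key
      have hordA : (PySem.List.sorted L (fun a => [(G a).getD "R" 0, (G a).getD "A" 0, (G a).getD "D" 0]) false).map ((fun d => d.getD "i" 0) ∘ G)
          = PySem.List.sorted L (fun a => [(G a).getD "R" 0, (G a).getD "A" 0, (G a).getD "D" 0]) false := by
        rw [show ((fun d => d.getD "i" 0) ∘ G) = (fun i => (G i).getD "i" 0) from rfl]
        conv_rhs => rw [← List.map_id (PySem.List.sorted L _ false)]
        apply List.map_congr_left
        intro i hi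
        have hiL : i ∈ L := (PySem.List.mem_sorted L _ false i).mp hi
        obtain ⟨h0, h1⟩ := hmemL i hiL
        exact (hgetG i h0 h1).2.2.2
      rw [hordA]
      -- B's counts table: pointwise the spec key, via the inverted index
      have hc0len : ((L.map (fun _ => [(0 : Int), 0, 0]))).length = fragments.length := by
        rw [List.length_map, hLlen, hn]
      have hc0get : ∀ k : Nat, k < fragments.length → (L.map (fun _ => [(0 : Int), 0, 0])).getD k [] = pvRow (0, 0, 0) := by
        intro k hk
        rw [List.getD_eq_getElem _ [] (by rw [List.length_map, hLlen, hn]; exact hk)]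
        simp [pvRow]
      obtain ⟨hclen, hcget⟩ := pv_counts_spec fragments C (L.map (fun _ => [(0 : Int), 0, 0]))
        (fun _ => (0, 0, 0)) hc0len hc0get
      rw [← hL] at hclen hcget
      set counts := C.foldl (pvB_applyPair (pvB_index fragments) (PySem.Set.ofList L)) (L.map (fun _ => [(0 : Int), 0, 0])) with hcounts
      -- the two sort keys agree on the range
      have hkcong : PySem.List.sorted L (fun a => [(G a).getD "R" 0, (G a).getD "A" 0, (G a).getD "D" 0]) false
          = PySem.List.sorted L (fun i => PySem.List.pyGetD counts i []) false := by
        apply pv_sorted_key_congr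
        intro i hiL
        obtain ⟨h0, h1⟩ := hmemL i hiL
        obtain ⟨eR, eA, eD, _⟩ := hgetG i h0 h1
        have hkey : PySem.List.pyGetD counts i []
            = pvRow (pvKey C (PySem.List.pyGetD fragments i [])) := by
          rw [PySem.List.pyGetD_eq_getElem _ _ h0 (by rw [hclen, ← hn]; exact h1)]
          rw [← List.getD_eq_getElem _ [] (by rw [hclen]; omega)]
          rw [hcget i.toNat (by omega)]
          rw [Int.toNat_of_nonneg h0]
          rfl
        rw [eR, eA, eD, hkey]
        rfl
      rw [hkcong]
      -- the placement loops agree: same order list, swapped zip, same initial list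
      set ord := PySem.List.sorted L (fun i => PySem.List.pyGetD counts i []) false with hord
      have hinit : PySem.List.pyRepeat [([] : List Int)] (PySem.List.len fragments)
          = L.map (fun _ => ([] : List Int)) := by
        rw [PySem.List.pyRepeat_singleton, hlen', List.map_const', hLlen]
        simp
      rw [hinit]
      rw [← List.zip_swap ord fragments, List.foldl_map]
      rfl
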